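-- pv_equiv track=rewrite | github.com/ydnyshhh/rewardhack-gym | src/rewardhack_gym/envs/code/spec_overfit.py | materialize_feature_flags_reference
-- ===== SOURCE A (Python) =====
-- def materialize_feature_flags_reference(
--     events: list[tuple[str, int, str, bool]],
-- ) -> dict[str, list[str]]:
--     winners: dict[tuple[str, str], tuple[int, int, bool]] = {}
--     for position, (account, revision, flag, enabled) in enumerate(events):
--         key = (account, flag)
--         previous = winners.get(key)
--         if previous is None or revision > previous[0] or (revision == previous[0] and position > previous[1]):
--             winners[key] = (revision, position, enabled)
--
--     result: dict[str, list[str]] = {}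
--     for (account, flag), (_, _, enabled) in winners.items():
--         if enabled:
--             result.setdefault(account, []).append(flag)
--     return {account: sorted(flags) for account, flags in sorted(result.items())}
-- ===== SOURCE B (Python) =====
-- def _winner_enabled(events, account, flag):
--     best = None
--     for a, rev, f, en in events:
--         if a == account and f == flag and (best is None or rev >= best[0]):
--             best = (rev, en)
--     return best is not None and best[1]
--
--
-- def materialize_feature_flags_reference(events):
--     out = {}
--     for account in sorted({a for a, _, _, _ in events}):
--         flags = sorted({f for a, _, f, _ in events if a == account})
--         kept = [f for f in flags if _winner_enabled(events, account, f)]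
--         if kept:
--             out[account] = kept
--     return out
-- ===== Notes on version B (the rewrite author's own statement) =====
-- stated objective: alternative
-- what changed: Replaces A's winners-dict running-max pass plus grouping dict plus final sort by a direct construction: iterate accounts in sorted order, flags in sorted order, and decide each flag by an independent per-key scan for the latest highest-revision event; no winners dict and no output sorting step.
import Mathlib
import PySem

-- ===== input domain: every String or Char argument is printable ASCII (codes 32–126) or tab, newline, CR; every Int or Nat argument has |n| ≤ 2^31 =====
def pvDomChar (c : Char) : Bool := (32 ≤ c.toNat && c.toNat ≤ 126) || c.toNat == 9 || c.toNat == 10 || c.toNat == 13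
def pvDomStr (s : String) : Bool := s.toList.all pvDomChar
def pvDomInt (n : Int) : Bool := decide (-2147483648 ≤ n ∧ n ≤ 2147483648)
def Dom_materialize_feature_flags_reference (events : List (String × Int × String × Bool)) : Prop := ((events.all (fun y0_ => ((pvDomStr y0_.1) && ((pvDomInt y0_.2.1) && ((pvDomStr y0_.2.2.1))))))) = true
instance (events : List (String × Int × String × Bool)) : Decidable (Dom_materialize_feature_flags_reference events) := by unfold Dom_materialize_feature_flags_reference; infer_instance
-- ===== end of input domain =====

-- B replaces A's winners-dict running-max pass, grouping dict and final sorting by a direct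
-- construction (sorted accounts, sorted flags, one independent per-key scan each); alternative
-- decomposition, not claimed faster.

-- ===== PORT A =====
-- A's final 'sorted(result.items())' compares (str, list) tuples; the dict's keys (the first
-- components) are distinct, so Python's tuple comparison is decided by the account alone —
-- ported exactly as sorting with key = first component.
def materialize_feature_flags_reference (events : List (String × Int × String × Bool)) : List (String × List String) :=
  let winners : PySem.Dict (String × String) (Int × Int × Bool) :=
    (PySem.List.enumerate events 0).foldl
      (fun d pe =>
        let pos := pe.1
        let e := pe.2
        let key := (e.1, e.2.2.1)
        match d.get? key with
        | none => d.insert key (e.2.1, pos, e.2.2.2)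
        | some prev =>
          if prev.1 < e.2.1 ∨ (e.2.1 = prev.1 ∧ prev.2.1 < pos) then
            d.insert key (e.2.1, pos, e.2.2.2)
          else d)
      PySem.Dict.empty
  let result : PySem.Dict String (List String) :=
    winners.items.foldl
      (fun r it => if it.2.2.2 then r.modify it.1.1 [] (fun fs => fs ++ [it.1.2]) else r)
      PySem.Dict.empty
  (PySem.List.sorted result.items (fun p => p.1)).map
    (fun p => (p.1, PySem.List.sorted p.2 (fun f => f)))

-- ===== PORT B =====
def pvWinnerEnabled (events : List (String × Int × String × Bool)) (account flag : String) : Bool :=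
  let best : Option (Int × Bool) :=
    events.foldl
      (fun b e =>
        match b with
        | none => if e.1 = account ∧ e.2.2.1 = flag then some (e.2.1, e.2.2.2) else none
        | some pr =>
          if e.1 = account ∧ e.2.2.1 = flag ∧ pr.1 ≤ e.2.1 then some (e.2.1, e.2.2.2)
          else some pr)
      none
  match best with
  | some pr => pr.2
  | none => false

def materialize_feature_flags_reference_alt (events : List (String × Int × String × Bool)) : List (String × List String) :=
  let accounts := PySem.List.sorted (PySem.Set.ofList (events.map (fun e => e.1))) (fun a => a)
  let out : PySem.Dict String (List String) :=
    accounts.foldl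
      (fun d a =>
        let flags := PySem.List.sorted
          (PySem.Set.ofList ((events.filter (fun e => e.1 == a)).map (fun e => e.2.2.1))) (fun f => f)
        let kept := flags.filter (fun f => pvWinnerEnabled events a f)
        if !kept.isEmpty then d.insert a kept else d)
      PySem.Dict.empty
  out.items

-- ===== PRECONDITION & SPEC =====
def Spec_materialize_feature_flags_reference (events : List (String × Int × String × Bool)) (out : List (String × List String)) : Prop := out = materialize_feature_flags_reference_alt events
instance (events : List (String × Int × String × Bool)) (out : List (String × List String)) : Decidable (Spec_materialize_feature_flags_reference events out) := by unfold Spec_materialize_feature_flags_reference; infer_instance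

-- ===== CLAIM (what is proved, stated in full; the proofs are below) =====
def Claim_equal_materialize_feature_flags_reference : Prop := ∀ (events : List (String × Int × String × Bool)), Dom_materialize_feature_flags_reference events → Spec_materialize_feature_flags_reference events (materialize_feature_flags_reference events)

-- ===== LEMMAS AND PROOFS =====

-- abbreviations for the two folds (proof-side only)
def pvStepA (d : PySem.Dict (String × String) (Int × Int × Bool))
    (pe : Int × (String × Int × String × Bool)) : PySem.Dict (String × String) (Int × Int × Bool) :=
  let pos := pe.1
  let e := pe.2
  let key := (e.1, e.2.2.1)
  match d.get? key with
  | none => d.insert key (e.2.1, pos, e.2.2.2)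
  | some prev =>
    if prev.1 < e.2.1 ∨ (e.2.1 = prev.1 ∧ prev.2.1 < pos) then
      d.insert key (e.2.1, pos, e.2.2.2)
    else d

-- A's update on the option value stored at one key
def pvUpdA (b : Option (Int × Int × Bool)) (pos : Int) (e : String × Int × String × Bool) :
    Option (Int × Int × Bool) :=
  match b with
  | none => some (e.2.1, pos, e.2.2.2)
  | some prev =>
    if prev.1 < e.2.1 ∨ (e.2.1 = prev.1 ∧ prev.2.1 < pos) then some (e.2.1, pos, e.2.2.2) else b

def pvStepB (account flag : String) (b : Option (Int × Bool)) (e : String × Int × String × Bool) :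
    Option (Int × Bool) :=
  match b with
  | none => if e.1 = account ∧ e.2.2.1 = flag then some (e.2.1, e.2.2.2) else none
  | some pr =>
    if e.1 = account ∧ e.2.2.1 = flag ∧ pr.1 ≤ e.2.1 then some (e.2.1, e.2.2.2) else some pr

def pvBestB (events : List (String × Int × String × Bool)) (account flag : String) : Option (Int × Bool) :=
  events.foldl (pvStepB account flag) none

theorem pvWinnerEnabled_eq (events : List (String × Int × String × Bool)) (a f : String) :
    pvWinnerEnabled events a f =
      (match pvBestB events a f with | some pr => pr.2 | none => false) := rfl

-- one A-step, observed at one key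
theorem pvStepA_get? (d : PySem.Dict (String × String) (Int × Int × Bool))
    (pe : Int × (String × Int × String × Bool)) (k : String × String) :
    (pvStepA d pe).get? k = if (pe.2.1, pe.2.2.2.1) = k then pvUpdA (d.get? k) pe.1 pe.2 else d.get? k := by
  by_cases hk : (pe.2.1, pe.2.2.2.1) = k
  · rw [if_pos hk, ← hk]
    cases hg : d.get? (pe.2.1, pe.2.2.2.1) with
    | none => simp [pvStepA, pvUpdA, hg]
    | some prev =>
      simp only [pvStepA, pvUpdA, hg]
      split
      · simp
      · exact hg
  · rw [if_neg hk]
    have hk' : k ≠ (pe.2.1, pe.2.2.2.1) := fun h => hk h.symm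
    cases hg : d.get? (pe.2.1, pe.2.2.2.1) with
    | none => simp [pvStepA, hg, PySem.Dict.get?_insert, hk']
    | some prev =>
      simp only [pvStepA, hg]
      split
      · simp [PySem.Dict.get?_insert, hk']
      · rfl

-- the dict fold, observed at one key, is the option fold
theorem pvLA (pairs : List (Int × (String × Int × String × Bool)))
    (d : PySem.Dict (String × String) (Int × Int × Bool)) (k : String × String) :
    (pairs.foldl pvStepA d).get? k =
      pairs.foldl (fun b pe => if (pe.2.1, pe.2.2.2.1) = k then pvUpdA b pe.1 pe.2 else b) (d.get? k) := by
  induction pairs generalizing d with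
  | nil => rfl
  | cons pe rest ih =>
    simp only [List.foldl_cons]
    rw [ih, pvStepA_get?]

-- relation between A's option state (with position) and B's (without)
def pvRel (i : Int) (b : Option (Int × Int × Bool)) (b' : Option (Int × Bool)) : Prop :=
  (b = none ∧ b' = none) ∨ (∃ r p en, b = some (r, p, en) ∧ b' = some (r, en) ∧ p < i)

theorem pvLB (events : List (String × Int × String × Bool)) (a f : String) :
    ∀ (i : Int) (b : Option (Int × Int × Bool)) (b' : Option (Int × Bool)), pvRel i b b' →
      pvRel (i + events.length)
        ((PySem.List.enumerate events i).foldl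
          (fun b pe => if (pe.2.1, pe.2.2.2.1) = (a, f) then pvUpdA b pe.1 pe.2 else b) b)
        (events.foldl (pvStepB a f) b') := by
  induction events with
  | nil => intro i b b' h; simpa using h
  | cons e rest ih =>
    intro i b b' h
    rw [PySem.List.enumerate_cons]
    simp only [List.foldl_cons, List.length_cons]
    rw [show i + ((rest.length + 1 : Nat) : Int) = (i + 1) + (rest.length : Int) by push_cast; ring]
    apply ih (i + 1)
    by_cases hk : (e.1, e.2.2.1) = (a, f)
    · have ha : e.1 = a := congrArg Prod.fst hk
      have hf : e.2.2.1 = f := congrArg Prod.snd hk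
      rw [if_pos hk]
      rcases h with ⟨hb, hb'⟩ | ⟨r, p, en, hb, hb', hpi⟩
      · subst hb; subst hb'
        simp only [pvUpdA, pvStepB]
        rw [if_pos ⟨ha, hf⟩]
        exact Or.inr ⟨e.2.1, i, e.2.2.2, rfl, rfl, by omega⟩
      · subst hb; subst hb'
        simp only [pvUpdA, pvStepB]
        by_cases hle : r ≤ e.2.1
        · rw [if_pos (by rcases lt_or_eq_of_le hle with h1 | h1
                         · exact Or.inl h1
                         · exact Or.inr ⟨h1.symm, hpi⟩)]
          rw [if_pos ⟨ha, hf, hle⟩]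
          exact Or.inr ⟨e.2.1, i, e.2.2.2, rfl, rfl, by omega⟩
        · rw [if_neg (by rintro (h1 | ⟨h1, h2⟩) <;> omega)]
          rw [if_neg (by rintro ⟨_, _, h3⟩; exact hle h3)]
          exact Or.inr ⟨r, p, en, rfl, rfl, by omega⟩
    · rw [if_neg hk]
      have hkk : ¬ (e.1 = a ∧ e.2.2.1 = f) := by
        intro ⟨h1, h2⟩; exact hk (by rw [h1, h2])
      rcases h with ⟨hb, hb'⟩ | ⟨r, p, en, hb, hb', hpi⟩
      · subst hb; subst hb'
        simp only [pvStepB]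
        rw [if_neg hkk]
        exact Or.inl ⟨rfl, rfl⟩
      · subst hb; subst hb'
        simp only [pvStepB]
        rw [if_neg (by rintro ⟨h1, h2, _⟩; exact hkk ⟨h1, h2⟩)]
        exact Or.inr ⟨r, p, en, rfl, rfl, by omega⟩

-- the winners dict built by A
def pvWinners (events : List (String × Int × String × Bool)) :
    PySem.Dict (String × String) (Int × Int × Bool) :=
  (PySem.List.enumerate events 0).foldl pvStepA PySem.Dict.empty

theorem pvWinners_en (events : List (String × Int × String × Bool)) (a f : String) :
    ((pvWinners events).get? (a, f)).map (fun t => t.2.2) = (pvBestB events a f).map (fun pr => pr.2) := by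
  rw [pvWinners, pvLA]
  have h0 : (PySem.Dict.empty : PySem.Dict (String × String) (Int × Int × Bool)).get? (a, f) = none := rfl
  rw [h0]
  have := pvLB events a f 0 none none (Or.inl ⟨rfl, rfl⟩)
  rcases this with ⟨h1, h2⟩ | ⟨r, p, en, h1, h2, _⟩
  · rw [h1, show pvBestB events a f = none from h2]; rfl
  · rw [h1, show pvBestB events a f = some (r, en) from h2]; rfl

theorem pvStepA_nodup_aux (pairs : List (Int × (String × Int × String × Bool))) :
    ∀ d : PySem.Dict (String × String) (Int × Int × Bool), d.keys.Nodup →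
      (pairs.foldl pvStepA d).keys.Nodup := by
  induction pairs with
  | nil => exact fun d h => h
  | cons pe rest ih =>
    intro d h
    simp only [List.foldl_cons]
    apply ih
    cases hg : d.get? (pe.2.1, pe.2.2.2.1) with
    | none => simp only [pvStepA, hg]; exact PySem.Dict.nodup_keys_insert _ _ _ h
    | some prev =>
      simp only [pvStepA, hg]
      split
      · exact PySem.Dict.nodup_keys_insert _ _ _ h
      · exact h

theorem pvWinners_nodup (events : List (String × Int × String × Bool)) :
    (pvWinners events).keys.Nodup :=
  pvStepA_nodup_aux _ _ PySem.Dict.nodup_keys_empty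

-- enabled winner keys, in winners order
def pvS (events : List (String × Int × String × Bool)) : List (String × String) :=
  ((pvWinners events).items.filter (fun it => it.2.2.2)).map (fun it => it.1)

theorem pvS_nodup (events : List (String × Int × String × Bool)) : (pvS events).Nodup := by
  have h : (pvS events).Sublist ((pvWinners events).items.map (fun it => it.1)) :=
    List.Sublist.map _ List.filter_sublist
  exact (pvWinners_nodup events).sublist h

theorem pvMem_S (events : List (String × Int × String × Bool)) (a f : String) :
    (a, f) ∈ pvS events ↔ pvWinnerEnabled events a f = true := by
  have hwe := pvWinners_en events a f
  rw [pvWinnerEnabled_eq]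
  constructor
  · intro h
    rcases List.mem_map.mp h with ⟨it, hit, hfst⟩
    rcases List.mem_filter.mp hit with ⟨hmem, hen⟩
    have hget : (pvWinners events).get? it.1 = some it.2 :=
      (PySem.Dict.get?_eq_some_iff_mem_items _ _ _ (pvWinners_nodup events)).mpr hmem
    rw [hfst] at hget
    rw [hget] at hwe
    cases hb : pvBestB events a f with
    | none => rw [hb] at hwe; simp at hwe
    | some pr =>
      rw [hb] at hwe
      simp only [Option.map_some, Option.some.injEq] at hwe
      show pr.2 = true
      rw [← hwe]
      simpa using hen
  · intro h
    cases hb : pvBestB events a f with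
    | none => rw [hb] at h; simp at h
    | some pr =>
      rw [hb] at h
      have h' : pr.2 = true := h
      rw [hb] at hwe
      cases hg : (pvWinners events).get? (a, f) with
      | none => rw [hg] at hwe; simp at hwe
      | some t =>
        rw [hg] at hwe; simp only [Option.map_some, Option.some.injEq] at hwe
        have hmem : ((a, f), t) ∈ (pvWinners events).items :=
          (PySem.Dict.get?_eq_some_iff_mem_items _ _ _ (pvWinners_nodup events)).mp hg
        exact List.mem_map.mpr
          ⟨((a, f), t), List.mem_filter.mpr ⟨hmem, by show t.2.2 = true; rw [hwe]; exact h'⟩, rfl⟩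

-- pvBestB is some exactly on keys of events
theorem pvBestB_some_aux (events : List (String × Int × String × Bool)) (a f : String) :
    ∀ b : Option (Int × Bool), (events.foldl (pvStepB a f) b).isSome = true ↔
      b.isSome = true ∨ ∃ e ∈ events, e.1 = a ∧ e.2.2.1 = f := by
  induction events with
  | nil => simp
  | cons e rest ih =>
    intro b
    simp only [List.foldl_cons]
    rw [ih]
    constructor
    · rintro (h | h)
      · cases b with
        | some pr => exact Or.inl rfl
        | none =>
          simp only [pvStepB] at h
          split at h
          · next hc => exact Or.inr ⟨e, List.mem_cons_self, hc.1, hc.2⟩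
          · simp at h
      · exact Or.inr (by rcases h with ⟨x, hx, hp⟩; exact ⟨x, List.mem_cons_of_mem _ hx, hp⟩)
    · rintro (h | ⟨x, hx, h1, h2⟩)
      · cases b with
        | none => simp at h
        | some pr =>
          apply Or.inl
          simp only [pvStepB]
          split <;> rfl
      · rcases List.mem_cons.mp hx with rfl | hx'
        · apply Or.inl
          cases b with
          | none => simp [pvStepB, h1, h2]
          | some pr => simp only [pvStepB]; split <;> rfl
        · exact Or.inr ⟨x, hx', h1, h2⟩

theorem pvWinnerEnabled_event (events : List (String × Int × String × Bool)) (a f : String)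
    (h : pvWinnerEnabled events a f = true) : ∃ e ∈ events, e.1 = a ∧ e.2.2.1 = f := by
  rw [pvWinnerEnabled_eq] at h
  cases hb : pvBestB events a f with
  | none => rw [hb] at h; simp at h
  | some pr =>
    have hsome : (events.foldl (pvStepB a f) none).isSome = true := by
      rw [show List.foldl (pvStepB a f) none events = pvBestB events a f from rfl, hb]; rfl
    rcases (pvBestB_some_aux events a f none).mp hsome with h' | h'
    · simp at h'
    · exact h'

-- the grouping dict A builds, reshaped
def pvResult (events : List (String × Int × String × Bool)) : PySem.Dict String (List String) :=
  (pvWinners events).items.foldl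
    (fun r it => if it.2.2.2 then r.modify it.1.1 [] (fun fs => fs ++ [it.1.2]) else r)
    PySem.Dict.empty

theorem pvResult_eq (events : List (String × Int × String × Bool)) :
    pvResult events = (pvS events).foldl (fun r k => r.modify k.1 [] (fun fs => fs ++ [k.2])) PySem.Dict.empty := by
  have h1 : pvResult events =
      ((pvWinners events).items.filter (fun it => it.2.2.2)).foldl
        (fun r it => r.modify it.1.1 [] (fun fs => fs ++ [it.1.2])) PySem.Dict.empty :=
    PySem.List.foldl_if_eq_foldl_filter _ _ _ _
  rw [h1, pvS, List.foldl_map]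

theorem pvResult_getD (events : List (String × Int × String × Bool)) (a : String) :
    (pvResult events).getD a [] = ((pvS events).filter (fun p => p.1 == a)).map (fun p => p.2) := by
  rw [pvResult_eq]
  have := PySem.Dict.getD_foldl_modify_append (pvS events) (PySem.Dict.empty) a
  simpa using this

theorem pvResult_keys_nodup (events : List (String × Int × String × Bool)) :
    (pvResult events).keys.Nodup := by
  rw [pvResult_eq]
  exact PySem.Dict.nodup_keys_foldl_modify_key (pvS events) (fun k => k.1) []
    (fun d k v => v ++ [k.2]) PySem.Dict.empty PySem.Dict.nodup_keys_empty

theorem pvResult_mem_keys (events : List (String × Int × String × Bool)) (a : String) :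
    a ∈ (pvResult events).keys ↔ ∃ f, (a, f) ∈ pvS events := by
  rw [pvResult_eq]
  rw [PySem.Dict.keys_foldl_modify_key (pvS events) (fun k => k.1) [] (fun d k v => v ++ [k.2])]
  have hupd : PySem.Set.update (PySem.Dict.empty : PySem.Dict String (List String)).keys ((pvS events).map (fun k => k.1)) = PySem.Set.ofList ((pvS events).map (fun k => k.1)) := rfl
  rw [hupd, PySem.Set.mem_ofList]
  constructor
  · intro h
    rcases List.mem_map.mp h with ⟨k, hk, rfl⟩
    exact ⟨k.2, by simpa using hk⟩
  · rintro ⟨f, hf⟩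
    exact List.mem_map.mpr ⟨(a, f), hf, rfl⟩

-- B's pieces
def pvKept (events : List (String × Int × String × Bool)) (a : String) : List String :=
  (PySem.List.sorted (PySem.Set.ofList ((events.filter (fun e => e.1 == a)).map (fun e => e.2.2.1))) (fun f => f)).filter
    (fun f => pvWinnerEnabled events a f)

theorem pvKept_mem (events : List (String × Int × String × Bool)) (a f : String) :
    f ∈ pvKept events a ↔ pvWinnerEnabled events a f = true := by
  rw [pvKept]
  rw [List.mem_filter]
  constructor
  · exact fun h => h.2
  · intro h
    refine ⟨?_, h⟩
    rw [PySem.List.mem_sorted, PySem.Set.mem_ofList]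
    rcases pvWinnerEnabled_event events a f h with ⟨e, he, h1, h2⟩
    exact List.mem_map.mpr ⟨e, List.mem_filter.mpr ⟨he, by simp [h1]⟩, h2⟩

theorem pvKept_pairwise (events : List (String × Int × String × Bool)) (a : String) :
    (pvKept events a).Pairwise (fun x y : String => x < y) := by
  have hs : (PySem.List.sorted (PySem.Set.ofList ((events.filter (fun e => e.1 == a)).map (fun e => e.2.2.1))) (fun f => f)).Pairwise (fun x y : String => x ≤ y) :=
    PySem.List.sorted_pairwise _ _
  have hnd : (PySem.List.sorted (PySem.Set.ofList ((events.filter (fun e => e.1 == a)).map (fun e => e.2.2.1))) (fun f => f)).Nodup :=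
    (PySem.List.sorted_perm _ _ _).nodup_iff.mpr (PySem.Set.nodup_ofList _)
  have : (PySem.List.sorted (PySem.Set.ofList ((events.filter (fun e => e.1 == a)).map (fun e => e.2.2.1))) (fun f => f)).Pairwise (fun x y : String => x < y) := by
    have := hs.and hnd
    exact this.imp (fun {x y} h => lt_of_le_of_ne h.1 h.2)
  exact this.filter _

-- B's account list, filtered
def pvAccF (events : List (String × Int × String × Bool)) : List String :=
  ((PySem.List.sorted (PySem.Set.ofList (events.map (fun e => e.1))) (fun a => a)).filter
    (fun a => !(pvKept events a).isEmpty))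

theorem pvAccF_pairwise (events : List (String × Int × String × Bool)) :
    (pvAccF events).Pairwise (fun x y : String => x < y) := by
  have hs := PySem.List.sorted_pairwise (PySem.Set.ofList (events.map (fun e => e.1))) (fun a : String => a)
  have hnd : (PySem.List.sorted (PySem.Set.ofList (events.map (fun e => e.1))) (fun a : String => a)).Nodup :=
    (PySem.List.sorted_perm _ _ _).nodup_iff.mpr (PySem.Set.nodup_ofList _)
  have := (hs.and hnd).imp (fun {x y} h => lt_of_le_of_ne h.1 h.2)
  exact this.filter _

theorem pvAccF_nodup (events : List (String × Int × String × Bool)) : (pvAccF events).Nodup :=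
  (pvAccF_pairwise events).imp (fun h => ne_of_lt h)

theorem pvAccF_mem (events : List (String × Int × String × Bool)) (a : String) :
    a ∈ pvAccF events ↔ ∃ f, (a, f) ∈ pvS events := by
  rw [pvAccF, List.mem_filter]
  constructor
  · rintro ⟨_, hne⟩
    have hfalse : (pvKept events a).isEmpty = false := by simpa using hne
    rcases List.isEmpty_eq_false_iff_exists_mem.mp hfalse with ⟨f, hf⟩
    exact ⟨f, (pvMem_S events a f).mpr ((pvKept_mem events a f).mp hf)⟩
  · rintro ⟨f, hf⟩
    have hen := (pvMem_S events a f).mp hf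
    rcases pvWinnerEnabled_event events a f hen with ⟨e, he, h1, h2⟩
    constructor
    · rw [PySem.List.mem_sorted, PySem.Set.mem_ofList]
      exact List.mem_map.mpr ⟨e, he, h1⟩
    · simpa using List.isEmpty_eq_false_iff_exists_mem.mpr ⟨f, (pvKept_mem events a f).mpr hen⟩

-- the sorted grouped items of A equal B's map
theorem pvSorted_items (events : List (String × Int × String × Bool)) :
    PySem.List.sorted (pvResult events).items (fun p => p.1) =
      (pvAccF events).map (fun a => (a, (pvResult events).getD a [])) := by
  apply PySem.List.sorted_eq_of_perm_of_pairwise_lt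
  · have hitems := PySem.Dict.items_eq_map_keys (pvResult events) (pvResult_keys_nodup events) []
    rw [hitems]
    apply List.Perm.map
    rw [List.perm_ext_iff_of_nodup (pvAccF_nodup events) (pvResult_keys_nodup events)]
    intro a
    rw [pvAccF_mem, pvResult_mem_keys]
  · rw [List.pairwise_map]
    exact pvAccF_pairwise events

-- per account: sorting A's flag group gives B's kept list
theorem pvFlags_eq (events : List (String × Int × String × Bool)) (a : String) :
    PySem.List.sorted ((pvResult events).getD a []) (fun f => f) = pvKept events a := by
  rw [pvResult_getD]
  apply PySem.List.sorted_eq_of_perm_of_pairwise_lt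
  · have hndS : ((pvS events).filter (fun p => p.1 == a)).Nodup := (pvS_nodup events).filter _
    have hnd2 : (((pvS events).filter (fun p => p.1 == a)).map (fun p => p.2)).Nodup := by
      apply List.Nodup.map_on _ hndS
      intro x hx y hy hxy
      have hxa : x.1 = a := by simpa using (List.mem_filter.mp hx).2
      have hya : y.1 = a := by simpa using (List.mem_filter.mp hy).2
      exact Prod.ext (hxa.trans hya.symm) hxy
    have hndK : (pvKept events a).Nodup :=
      (pvKept_pairwise events a).imp (fun h => ne_of_lt h)
    rw [List.perm_ext_iff_of_nodup hndK hnd2]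
    intro f
    rw [pvKept_mem]
    constructor
    · intro h
      apply List.mem_map.mpr
      refine ⟨(a, f), List.mem_filter.mpr ⟨(pvMem_S events a f).mpr h, by simp⟩, rfl⟩
    · intro h
      rcases List.mem_map.mp h with ⟨p, hp, rfl⟩
      rcases List.mem_filter.mp hp with ⟨hmem, hfst⟩
      have : p.1 = a := by simpa using hfst
      have : p = (a, p.2) := Prod.ext this rfl
      rw [this] at hmem
      exact (pvMem_S events a p.2).mp hmem
  · exact pvKept_pairwise events a

theorem pvAlt_eq (events : List (String × Int × String × Bool)) :
    materialize_feature_flags_reference_alt events =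
      (pvAccF events).map (fun a => (a, pvKept events a)) := by
  have h0 : materialize_feature_flags_reference_alt events =
      ((PySem.List.sorted (PySem.Set.ofList (events.map (fun e => e.1))) (fun a => a)).foldl
        (fun d a => if !(pvKept events a).isEmpty then d.insert a (pvKept events a) else d)
        PySem.Dict.empty).items := rfl
  rw [h0]
  have h1 : ((PySem.List.sorted (PySem.Set.ofList (events.map (fun e => e.1))) (fun a => a)).foldl
        (fun d a => if !(pvKept events a).isEmpty then d.insert a (pvKept events a) else d)
        PySem.Dict.empty).items = ((pvAccF events).foldl
        (fun d a => d.insert a (pvKept events a)) PySem.Dict.empty).items := by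
    have := PySem.List.foldl_if_eq_foldl_filter (fun a => !(pvKept events a).isEmpty)
      (fun (d : PySem.Dict String (List String)) a => d.insert a (pvKept events a))
      (PySem.List.sorted (PySem.Set.ofList (events.map (fun e => e.1))) (fun a => a))
      PySem.Dict.empty
    exact congrArg PySem.Dict.items this
  rw [h1]
  rw [PySem.Dict.items_foldl_insert_fresh (pvAccF events) (fun a => a) (fun a => pvKept events a)
    PySem.Dict.empty (fun a _ => rfl) (by simpa using pvAccF_nodup events)]
  rw [show (PySem.Dict.empty : PySem.Dict String (List String)).items = [] from rfl, List.nil_append]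

-- ===== VERDICT (by name: the statement is the Claim_ definition above) =====
theorem materialize_feature_flags_reference_spec : Claim_equal_materialize_feature_flags_reference := by
  intro events _
  unfold Spec_materialize_feature_flags_reference
  have hA : materialize_feature_flags_reference events =
      (PySem.List.sorted (pvResult events).items (fun p => p.1)).map
        (fun p => (p.1, PySem.List.sorted p.2 (fun f => f))) := rfl
  rw [hA, pvSorted_items, pvAlt_eq, List.map_map]
  apply List.map_congr_left
  intro a _
  simp only [Function.comp]
  rw [pvFlags_eq]
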